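-- pv_equiv track=rewrite | github.com/adkozlov/big_data-2016 | hw06/search.py | execute_on_column
-- ===== SOURCE A (Python) =====
-- def execute_on_column(column, subquery):
--     result = set()
--     index = 0
--     for (value, count) in column:
--         if value == subquery:
--             result.update(map(lambda x: x + index, range(count)))
--         index += count
--
--     return result
-- ===== SOURCE B (Python) =====
-- def execute_on_column(column, subquery):
--     offsets = [0]
--     for _, count in column:
--         offsets.append(offsets[-1] + count)
--     return {x
--             for (value, count), off in zip(column, offsets)
--             if value == subquery
--             for x in range(off, off + count)}
-- ===== Notes on version B (the rewrite author's own statement) =====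
-- stated objective: alternative
-- what changed: Replaces the inline running index accumulator with a separately materialized prefix-sum offsets table, then builds the result set in one comprehension over zip(column, offsets) expanding range(off, off+count) per matching run.
import Mathlib
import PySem

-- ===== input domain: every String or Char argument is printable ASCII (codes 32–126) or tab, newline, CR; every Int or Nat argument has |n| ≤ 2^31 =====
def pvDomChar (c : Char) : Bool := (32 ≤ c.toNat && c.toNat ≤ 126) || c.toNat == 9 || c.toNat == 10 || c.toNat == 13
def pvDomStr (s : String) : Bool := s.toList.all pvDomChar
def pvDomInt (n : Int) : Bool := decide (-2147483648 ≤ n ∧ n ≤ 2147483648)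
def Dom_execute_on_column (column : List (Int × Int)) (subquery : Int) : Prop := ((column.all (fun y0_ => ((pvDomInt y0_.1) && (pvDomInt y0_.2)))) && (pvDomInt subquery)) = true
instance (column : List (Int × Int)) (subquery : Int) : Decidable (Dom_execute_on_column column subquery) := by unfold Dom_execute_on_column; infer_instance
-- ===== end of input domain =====

-- B replaces A's running-index accumulator by a materialized prefix-sum offsets
-- table and a single comprehension over zip(column, offsets); same cost, alternative decomposition.

-- ===== PORT A =====
def execute_on_column (column : List (Int × Int)) (subquery : Int) : List Int :=
  (column.foldl
    (fun (st : PySem.Set Int × Int) vc =>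
      ((if vc.1 = subquery then
          PySem.Set.update st.1 ((PySem.List.pyRange 0 vc.2 1).map (fun x => x + st.2))
        else st.1),
       st.2 + vc.2))
    (PySem.Set.empty, 0)).1

-- ===== PORT B =====
-- offsets = [0]; for _, count in column: offsets.append(offsets[-1] + count)
def pvOffsets (column : List (Int × Int)) : List Int :=
  column.foldl (fun offs vc => offs ++ [(PySem.List.pyGet? offs (-1)).getD 0 + vc.2]) [0]

def execute_on_column_alt (column : List (Int × Int)) (subquery : Int) : List Int :=
  PySem.Set.ofList
    ((column.zip (pvOffsets column)).flatMap
      (fun p => if p.1.1 = subquery then PySem.List.pyRange p.2 (p.2 + p.1.2) 1 else []))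

-- ===== PRECONDITION & SPEC =====
def Spec_execute_on_column (column : List (Int × Int)) (subquery : Int) (out : List Int) : Prop := out = execute_on_column_alt column subquery
instance (column : List (Int × Int)) (subquery : Int) (out : List Int) : Decidable (Spec_execute_on_column column subquery out) := by unfold Spec_execute_on_column; infer_instance

-- ===== CLAIM (what is proved, stated in full; the proofs are below) =====
def Claim_equal_execute_on_column : Prop := ∀ (column : List (Int × Int)) (subquery : Int), Dom_execute_on_column column subquery → Spec_execute_on_column column subquery (execute_on_column column subquery)

-- ===== LEMMAS AND PROOFS =====

-- the elements A inserts, listed in insertion order, starting from running index i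
def pvGen (q : Int) : List (Int × Int) → Int → List Int
  | [], _ => []
  | (v, c) :: t, i =>
      (if v = q then PySem.List.pyRange i (i + c) 1 else []) ++ pvGen q t (i + c)

-- exclusive prefix sums of the counts starting at i
def pvOffsFrom (i : Int) : List (Int × Int) → List Int
  | [] => [i]
  | (_, c) :: t => i :: pvOffsFrom (i + c) t

lemma pvRange_shift (c i : Int) :
    (PySem.List.pyRange 0 c 1).map (fun x => x + i) = PySem.List.pyRange i (i + c) 1 := by
  rw [PySem.List.pyRange_one, PySem.List.pyRange_one]
  simp only [List.map_map, sub_zero, add_sub_cancel_left]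
  exact List.map_congr_left (fun k _ => by simp [Function.comp]; ring)

lemma pvFoldA (q : Int) (t : List (Int × Int)) :
    ∀ (S : PySem.Set Int) (i : Int),
      (t.foldl
        (fun (st : PySem.Set Int × Int) vc =>
          ((if vc.1 = q then
              PySem.Set.update st.1 ((PySem.List.pyRange 0 vc.2 1).map (fun x => x + st.2))
            else st.1),
           st.2 + vc.2))
        (S, i)).1 = PySem.Set.update S (pvGen q t i) := by
  induction t with
  | nil => intro S i; simp [pvGen, PySem.Set.update]
  | cons vc t ih =>
      intro S i
      obtain ⟨v, c⟩ := vc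
      simp only [List.foldl_cons, pvGen]
      by_cases h : v = q
      · simp only [h, if_true]
        rw [ih]
        simp [PySem.Set.update, pvRange_shift, List.foldl_append]
      · simp only [if_neg h]
        rw [ih]
        simp [PySem.Set.update]

lemma pvOffsets_from (t : List (Int × Int)) :
    ∀ (ys : List Int) (i : Int),
      (t.foldl (fun offs vc => offs ++ [(PySem.List.pyGet? offs (-1)).getD 0 + vc.2]) (ys ++ [i]))
        = ys ++ pvOffsFrom i t := by
  induction t with
  | nil => intro ys i; simp [pvOffsFrom]
  | cons vc t ih =>
      intro ys i
      simp only [List.foldl_cons, PySem.List.pyGet?_neg_one_append_singleton, Option.getD_some]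
      rw [ih (ys ++ [i]) (i + vc.2)]
      simp [pvOffsFrom]

lemma pvZipGen (q : Int) (t : List (Int × Int)) :
    ∀ (i : Int),
      ((t.zip (pvOffsFrom i t)).flatMap
        (fun p => if p.1.1 = q then PySem.List.pyRange p.2 (p.2 + p.1.2) 1 else []))
        = pvGen q t i := by
  induction t with
  | nil => intro i; simp [pvGen]
  | cons vc t ih =>
      intro i
      obtain ⟨v, c⟩ := vc
      simp only [pvOffsFrom, List.zip_cons_cons, List.flatMap_cons, pvGen, ih]

-- ===== VERDICT (by name: the statement is the Claim_ definition above) =====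
theorem execute_on_column_spec : Claim_equal_execute_on_column := by
  intro column subquery _
  unfold Spec_execute_on_column execute_on_column execute_on_column_alt pvOffsets
  rw [pvFoldA, show ([0] : List Int) = [] ++ [0] from rfl, pvOffsets_from, List.nil_append,
      pvZipGen]
  rfl
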